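-- pv_equiv track=rewrite | github.com/zofialuther/CS8395-08-Paper1-updated | data/translated-code/pseudo-to-python/prolog/The-Twelve-Days-of-Christmas.py | giftsFor
-- ===== SOURCE A (Python) =====
-- def gift(n, description):
--     return (n, description)
--
-- def giftsFor(N, result):
--     if N == 0:
--         return result
--     else:
--         h = gift(N, "")
--         result.append(h)
--         M = N - 1
--         return giftsFor(M, result)
-- ===== SOURCE B (Python) =====
-- def giftsFor(N, result):
--     for i in range(N, 0, -1):
--         result.append((i, ""))
--     return result
-- ===== Notes on version B (the rewrite author's own statement) =====
-- stated objective: simpler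
-- what changed: Replaced the tail recursion (with its gift helper) by a single descending range loop that appends (i, "") for i = N..1.
import Mathlib
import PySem

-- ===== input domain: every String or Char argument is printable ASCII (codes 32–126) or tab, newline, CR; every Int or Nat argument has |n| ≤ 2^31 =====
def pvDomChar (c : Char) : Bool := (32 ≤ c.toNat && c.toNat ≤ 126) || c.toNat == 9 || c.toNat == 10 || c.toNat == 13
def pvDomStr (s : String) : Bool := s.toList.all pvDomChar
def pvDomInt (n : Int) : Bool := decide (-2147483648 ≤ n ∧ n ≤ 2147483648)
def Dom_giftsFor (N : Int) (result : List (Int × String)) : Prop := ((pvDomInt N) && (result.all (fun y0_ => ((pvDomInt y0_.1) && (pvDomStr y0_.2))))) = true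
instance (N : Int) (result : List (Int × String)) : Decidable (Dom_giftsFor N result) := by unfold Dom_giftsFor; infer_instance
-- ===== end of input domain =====

-- B replaces A's tail recursion by a descending range loop (same appends, same order);
-- equivalence is about return values — A and B mutate `result` identically in Python.

-- ===== PORT A =====
def gift (n : Int) (description : String) : Int × String := (n, description)

-- fuel = number of remaining recursive steps; N.toNat is exact for N ≥ 0 (Pre_)
def giftsForFuel (fuel : Nat) (N : Int) (result : List (Int × String)) : List (Int × String) :=
  match fuel with
  | 0 => result
  | f + 1 =>
    if N = 0 then result
    else
      let h := gift N ""
      let result' := result ++ [h]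
      let M := N - 1
      giftsForFuel f M result'

def giftsFor (N : Int) (result : List (Int × String)) : List (Int × String) :=
  giftsForFuel N.toNat N result

-- ===== PORT B =====
def giftsFor_alt (N : Int) (result : List (Int × String)) : List (Int × String) :=
  (PySem.List.pyRange N 0 (-1)).foldl (fun acc i => acc ++ [(i, "")]) result

-- ===== PRECONDITION & SPEC =====
-- Pre_ excludes N < 0, on which A recurses forever (RecursionError in Python).
def Pre_giftsFor (N : Int) (result : List (Int × String)) : Prop := 0 ≤ N
instance (N : Int) (result : List (Int × String)) : Decidable (Pre_giftsFor N result) := by unfold Pre_giftsFor; infer_instance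
def pvWitness_giftsFor : Int × (List (Int × String)) := (3, [(7, "x")])

def Spec_giftsFor (N : Int) (result : List (Int × String)) (out : List (Int × String)) : Prop := out = giftsFor_alt N result
instance (N : Int) (result : List (Int × String)) (out : List (Int × String)) : Decidable (Spec_giftsFor N result out) := by unfold Spec_giftsFor; infer_instance

-- ===== CLAIM (what is proved, stated in full; the proofs are below) =====
def Claim_equal_giftsFor : Prop := ∀ (N : Int) (result : List (Int × String)), Dom_giftsFor N result → Pre_giftsFor N result → Spec_giftsFor N result (giftsFor N result)

-- ===== LEMMAS AND PROOFS =====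
theorem giftsForFuel_eq_foldl (n : Nat) :
    ∀ (result : List (Int × String)),
      giftsForFuel n (n : Int) result
        = (PySem.List.pyRange (n : Int) 0 (-1)).foldl (fun acc i => acc ++ [(i, "")]) result := by
  induction n with
  | zero =>
    intro result
    simp [giftsForFuel, PySem.List.pyRange_neg_one_eq_nil (by omega : (0 : Int) ≤ 0)]
  | succ m ih =>
    intro result
    have hne : ((m + 1 : Nat) : Int) ≠ 0 := by push_cast; omega
    have hcons := PySem.List.pyRange_neg_one_cons (a := ((m + 1 : Nat) : Int)) (b := 0)
      (by push_cast; omega)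
    rw [hcons]
    simp only [giftsForFuel, gift, if_neg hne, List.foldl_cons]
    have : ((m + 1 : Nat) : Int) - 1 = (m : Int) := by push_cast; omega
    rw [this]
    exact ih _

-- ===== VERDICT (by name: the statement is the Claim_ definition above) =====
theorem giftsFor_spec : Claim_equal_giftsFor := by
  intro N result _ hpre
  unfold Spec_giftsFor giftsFor giftsFor_alt
  obtain ⟨n, rfl⟩ : ∃ n : Nat, N = (n : Int) := ⟨N.toNat, (Int.toNat_of_nonneg hpre).symm⟩
  rw [Int.toNat_natCast]
  exact giftsForFuel_eq_foldl n result
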